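-- pv_equiv track=rewrite | github.com/keejkrej/biology-agent | biology-structure/mcp-server/biology_structure_server/utils.py | validate_smiles
-- ===== SOURCE A (Python) =====
-- from typing import Dict, Any, List, Optional, Tuple
--
-- def validate_smiles(smiles: str) -> Tuple[bool, Optional[str]]:
--     """
--     Basic SMILES string validation.
--
--     Note: This is a basic syntactic check. For full validation,
--     use a cheminformatics library like RDKit.
--
--     Args:
--         smiles: SMILES string
--
--     Returns:
--         Tuple of (is_valid, error_message)
--     """
--     if not smiles:
--         return False, "SMILES string is empty"
--
--     smiles = smiles.strip()
--
--     # Check for minimum length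
--     if len(smiles) < 1:
--         return False, "SMILES string is too short"
--
--     # Check for balanced parentheses and brackets
--     paren_count = 0
--     bracket_count = 0
--
--     for char in smiles:
--         if char == '(':
--             paren_count += 1
--         elif char == ')':
--             paren_count -= 1
--         elif char == '[':
--             bracket_count += 1
--         elif char == ']':
--             bracket_count -= 1
--
--         if paren_count < 0 or bracket_count < 0:
--             return False, "Unbalanced parentheses or brackets in SMILES"
--
--     if paren_count != 0:
--         return False, "Unbalanced parentheses in SMILES"
--     if bracket_count != 0:
--         return False, "Unbalanced brackets in SMILES"
--
--     return True, None
-- ===== SOURCE B (Python) =====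
-- def _scan(s, opener, closer):
--     """One pass over s counting only opener/closer; returns (final depth, went_negative)."""
--     depth = 0
--     neg = False
--     for c in s:
--         if c == opener:
--             depth += 1
--         elif c == closer:
--             depth -= 1
--             if depth < 0:
--                 neg = True
--     return depth, neg
--
--
-- def validate_smiles(smiles):
--     if not smiles:
--         return False, "SMILES string is empty"
--
--     smiles = smiles.strip()
--     if len(smiles) < 1:
--         return False, "SMILES string is too short"
--
--     paren_total, paren_neg = _scan(smiles, '(', ')')
--     bracket_total, bracket_neg = _scan(smiles, '[', ']')
--
--     if paren_neg or bracket_neg: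
--         return False, "Unbalanced parentheses or brackets in SMILES"
--     if paren_total != 0:
--         return False, "Unbalanced parentheses in SMILES"
--     if bracket_total != 0:
--         return False, "Unbalanced brackets in SMILES"
--     return True, None
-- ===== Notes on version B (the rewrite author's own statement) =====
-- stated objective: idiomatic
-- what changed: B replaces A's single interleaved two-counter loop with a reusable helper that scans the string in two independent passes (one for parentheses, one for brackets), each returning a final depth and a sticky went-negative flag, with all messages decided after the scans.
import Mathlib
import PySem

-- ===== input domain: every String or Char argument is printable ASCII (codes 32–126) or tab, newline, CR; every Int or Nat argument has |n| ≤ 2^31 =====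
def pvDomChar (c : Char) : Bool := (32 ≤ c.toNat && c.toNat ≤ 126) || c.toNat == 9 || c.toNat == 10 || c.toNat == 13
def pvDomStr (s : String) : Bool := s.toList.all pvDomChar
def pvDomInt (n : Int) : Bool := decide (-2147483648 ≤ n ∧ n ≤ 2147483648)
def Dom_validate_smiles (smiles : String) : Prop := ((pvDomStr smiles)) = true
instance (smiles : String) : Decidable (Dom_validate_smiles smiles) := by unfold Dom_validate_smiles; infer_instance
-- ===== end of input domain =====

-- B replaces A's single interleaved two-counter loop by two independent scans
-- (a shared helper run once for parentheses, once for brackets), deciding all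
-- messages after the scans; objective: more idiomatic decomposition, same O(n) cost.

-- ===== PORT A =====
-- A's for-loop with early return, as structural recursion over the characters;
-- the post-loop total checks are the loop's [] case.
def pvLoopA : List Char → Int → Int → Bool × Option String
  | [], p, b =>
    if p ≠ 0 then (false, some "Unbalanced parentheses in SMILES")
    else if b ≠ 0 then (false, some "Unbalanced brackets in SMILES")
    else (true, none)
  | c :: cs, p, b =>
    let p' := if c = '(' then p + 1 else if c = ')' then p - 1 else p
    let b' := if c = '[' then b + 1 else if c = ']' then b - 1 else b
    if p' < 0 ∨ b' < 0 then (false, some "Unbalanced parentheses or brackets in SMILES")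
    else pvLoopA cs p' b'

def validate_smiles (smiles : String) : Bool × Option String :=
  if smiles = "" then (false, some "SMILES string is empty")
  -- 'smiles = smiles.strip()' is inlined: every later use is of the stripped string
  else if PySem.Str.len (PySem.Str.strip smiles) < 1 then (false, some "SMILES string is too short")
  else pvLoopA (PySem.Str.strip smiles).toList 0 0

-- ===== PORT B =====
-- Source B's _scan helper: fold over the characters with state (depth, went_negative).
def pvScanStep (opener closer : Char) (st : Int × Bool) (c : Char) : Int × Bool :=
  if c = opener then (st.1 + 1, st.2)
  else if c = closer then
    (st.1 - 1, st.2 || decide (st.1 - 1 < 0))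
  else st

def pvScan (s : List Char) (opener closer : Char) : Int × Bool :=
  s.foldl (pvScanStep opener closer) (0, false)

def validate_smiles_alt (smiles : String) : Bool × Option String :=
  if smiles = "" then (false, some "SMILES string is empty")
  -- 'smiles = smiles.strip()' is inlined, as in port A
  else if PySem.Str.len (PySem.Str.strip smiles) < 1 then (false, some "SMILES string is too short")
  else if (pvScan (PySem.Str.strip smiles).toList '(' ')').2 || (pvScan (PySem.Str.strip smiles).toList '[' ']').2 then
    (false, some "Unbalanced parentheses or brackets in SMILES")
  else if (pvScan (PySem.Str.strip smiles).toList '(' ')').1 ≠ 0 then (false, some "Unbalanced parentheses in SMILES")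
  else if (pvScan (PySem.Str.strip smiles).toList '[' ']').1 ≠ 0 then (false, some "Unbalanced brackets in SMILES")
  else (true, none)

-- ===== PRECONDITION & SPEC =====
def Spec_validate_smiles (smiles : String) (out : Bool × Option String) : Prop := out = validate_smiles_alt smiles
instance (smiles : String) (out : Bool × Option String) : Decidable (Spec_validate_smiles smiles out) := by unfold Spec_validate_smiles; infer_instance

-- ===== CLAIM (what is proved, stated in full; the proofs are below) =====
def Claim_equal_validate_smiles : Prop := ∀ (smiles : String), Dom_validate_smiles smiles → Spec_validate_smiles smiles (validate_smiles smiles)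

-- ===== LEMMAS AND PROOFS =====

-- Combining the results of the two scans, the way B's tail does.
def pvCombine (pr br : Int × Bool) : Bool × Option String :=
  if pr.2 || br.2 then (false, some "Unbalanced parentheses or brackets in SMILES")
  else if pr.1 ≠ 0 then (false, some "Unbalanced parentheses in SMILES")
  else if br.1 ≠ 0 then (false, some "Unbalanced brackets in SMILES")
  else (true, none)

-- The went-negative flag is sticky: once true, it stays true through the fold.
theorem pvScan_sticky (o c : Char) (cs : List Char) (d : Int) :
    (cs.foldl (pvScanStep o c) (d, true)).2 = true := by
  induction cs generalizing d with
  | nil => rfl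
  | cons x xs ih =>
    simp only [List.foldl_cons, pvScanStep]
    split_ifs <;> simp [ih]

-- Main invariant: A's interleaved loop from nonnegative counters equals the
-- combination of the two independent scans started at those counters.
theorem pvLoopA_eq_combine (cs : List Char) (p b : Int) (hp : 0 ≤ p) (hb : 0 ≤ b) :
    pvLoopA cs p b =
      pvCombine (cs.foldl (pvScanStep '(' ')') (p, false))
                (cs.foldl (pvScanStep '[' ']') (b, false)) := by
  induction cs generalizing p b with
  | nil =>
    simp only [List.foldl_nil, pvLoopA, pvCombine]
    rfl
  | cons c cs ih =>
    by_cases h1 : c = '('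
    · subst h1
      have : ¬ (p + 1 < 0 ∨ b < 0) := by omega
      simp [pvLoopA, pvScanStep, this, ih (p + 1) b (by omega) hb]
    · by_cases h2 : c = ')'
      · subst h2
        by_cases hneg : p - 1 < 0
        · simp [pvLoopA, pvScanStep, hneg, pvScan_sticky, pvCombine]
        · have : ¬ (p - 1 < 0 ∨ b < 0) := by omega
          simp [pvLoopA, pvScanStep, hneg, show ¬ b < 0 by omega,
                ih (p - 1) b (by omega) hb]
      · by_cases h3 : c = '['
        · subst h3
          have : ¬ (p < 0 ∨ b + 1 < 0) := by omega
          simp [pvLoopA, pvScanStep, this, ih p (b + 1) hp (by omega)]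
        · by_cases h4 : c = ']'
          · subst h4
            by_cases hneg : b - 1 < 0
            · simp [pvLoopA, pvScanStep, hneg, pvScan_sticky, pvCombine]
            · have : ¬ (p < 0 ∨ b - 1 < 0) := by omega
              simp [pvLoopA, pvScanStep, hneg, show ¬ p < 0 by omega,
                    ih p (b - 1) hp (by omega)]
          · have : ¬ (p < 0 ∨ b < 0) := by omega
            simp [pvLoopA, pvScanStep, h1, h2, h3, h4, this, ih p b hp hb]

-- ===== VERDICT (by name: the statement is the Claim_ definition above) =====
theorem validate_smiles_spec : Claim_equal_validate_smiles := by
  intro smiles _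
  show validate_smiles smiles = validate_smiles_alt smiles
  unfold validate_smiles validate_smiles_alt
  by_cases h1 : smiles = ""
  · rw [if_pos h1, if_pos h1]
  · rw [if_neg h1, if_neg h1]
    by_cases h2 : PySem.Str.len (PySem.Str.strip smiles) < 1
    · rw [if_pos h2, if_pos h2]
    · rw [if_neg h2, if_neg h2,
          pvLoopA_eq_combine (PySem.Str.strip smiles).toList 0 0 le_rfl le_rfl]
      rfl
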